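-- pv_equiv track=rewrite | github.com/ldkv/AdventOfCode | 2022/day11.py | calc_modulo
-- ===== SOURCE A (Python) =====
-- def calc_modulo(monkeys):
--     modulo = 1
--     set_modulo = {1}
--     for i in range(len(monkeys)):
--         if monkeys[i]['mod'] not in set_modulo:
--             modulo *= monkeys[i]['mod']
--         set_modulo.add(monkeys[i]['mod'])
--     return modulo
-- ===== SOURCE B (Python) =====
-- def calc_modulo(monkeys):
--     mods = sorted(monkey['mod'] for monkey in monkeys)
--     product = 1
--     prev = None
--     for v in mods:
--         if v != prev and v != 1:
--             product *= v
--         prev = v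
--     return product
-- ===== Notes on version B (the rewrite author's own statement) =====
-- stated objective: alternative
-- what changed: B sorts the mod values and multiplies each value that differs from its predecessor (skipping 1) in one adjacent scan, deduplicating by ordering instead of A's hash-set membership pass; correct because multiplication of the distinct values is order-independent.
import Mathlib
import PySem

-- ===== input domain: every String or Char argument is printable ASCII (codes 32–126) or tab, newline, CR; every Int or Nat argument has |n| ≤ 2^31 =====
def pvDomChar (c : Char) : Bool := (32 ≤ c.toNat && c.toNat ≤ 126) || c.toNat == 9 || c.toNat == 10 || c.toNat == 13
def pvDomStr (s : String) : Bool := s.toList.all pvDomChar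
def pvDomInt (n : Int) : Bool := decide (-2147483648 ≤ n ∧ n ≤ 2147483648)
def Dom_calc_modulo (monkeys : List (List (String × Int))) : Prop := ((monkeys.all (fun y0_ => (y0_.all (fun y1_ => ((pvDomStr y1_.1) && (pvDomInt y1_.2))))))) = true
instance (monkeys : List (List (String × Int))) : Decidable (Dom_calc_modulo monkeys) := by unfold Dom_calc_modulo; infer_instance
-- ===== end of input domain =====

-- B: sort the mod values, then one adjacent scan multiplying each value that differs from its predecessor (skipping 1) — dedup by ordering instead of A's set-membership pass (alternative algorithm, similar cost).


-- ===== PORT A =====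
def calc_modulo (monkeys : List (List (String × Int))) : Int :=
  ((PySem.List.pyRange 0 (monkeys.length : Int) 1).foldl
    (fun (st : Int × PySem.Set Int) i =>
      let v := PySem.Dict.getD (PySem.Dict.mk (PySem.List.pyGetD monkeys i [])) "mod" 0
      let modulo := if st.2.contains v then st.1 else st.1 * v
      (modulo, st.2.add v))
    (1, PySem.Set.ofList [1])).1

-- ===== PORT B =====
def calc_modulo_alt (monkeys : List (List (String × Int))) : Int :=
  let mods := PySem.List.sorted (monkeys.map (fun monkey => PySem.Dict.getD (PySem.Dict.mk monkey) "mod" 0)) (fun x => x) false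
  (mods.foldl
    (fun (st : Int × Option Int) v =>
      ((if some v ≠ st.2 ∧ v ≠ 1 then st.1 * v else st.1), some v))
    (1, none)).1

-- ===== PRECONDITION & SPEC =====
-- Pre_ excludes exactly the inputs where some monkey lacks the key "mod": there Python A raises KeyError.
def Pre_calc_modulo (monkeys : List (List (String × Int))) : Prop :=
  (monkeys.all (fun m => m.any (fun kv => kv.1 == "mod"))) = true
instance (monkeys : List (List (String × Int))) : Decidable (Pre_calc_modulo monkeys) := by unfold Pre_calc_modulo; infer_instance
def pvWitness_calc_modulo : (List (List (String × Int))) := [[("mod", 3)], [("mod", 1)], [("mod", 3), ("x", 7)]]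

def Spec_calc_modulo (monkeys : List (List (String × Int))) (out : Int) : Prop := out = calc_modulo_alt monkeys
instance (monkeys : List (List (String × Int))) (out : Int) : Decidable (Spec_calc_modulo monkeys out) := by unfold Spec_calc_modulo; infer_instance

-- ===== CLAIM (what is proved, stated in full; the proofs are below) =====
def Claim_equal_calc_modulo : Prop := ∀ (monkeys : List (List (String × Int))), Dom_calc_modulo monkeys → Pre_calc_modulo monkeys → Spec_calc_modulo monkeys (calc_modulo monkeys)

-- ===== LEMMAS AND PROOFS =====

-- product as a left fold, pulling the initial accumulator out
theorem pv_foldl_mul (xs : List Int) : ∀ (a : Int), xs.foldl (fun p v => p * v) a = a * xs.foldl (fun p v => p * v) 1 := by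
  induction xs with
  | nil => intro a; simp
  | cons x xs ih =>
    intro a
    simp only [List.foldl_cons]
    rw [ih (a * x), ih (1 * x)]
    ring

-- Set.update keeps its starting list as a prefix
theorem pv_update_prefix (vs : List Int) : ∀ (s : PySem.Set Int), ∃ t, PySem.Set.update s vs = s ++ t := by
  induction vs with
  | nil => intro s; exact ⟨[], by simp [PySem.Set.update]⟩
  | cons v vs ih =>
    intro s
    by_cases h : v ∈ s
    · obtain ⟨t, ht⟩ := ih s
      refine ⟨t, ?_⟩
      have hupd : PySem.Set.update s (v :: vs) = PySem.Set.update s vs := by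
        simp only [PySem.Set.update, List.foldl_cons]
        congr 1
        simp [PySem.Set.add, List.contains_eq_mem, h]
      rw [hupd, ht]
    · obtain ⟨t, ht⟩ := ih (s ++ [v])
      refine ⟨v :: t, ?_⟩
      have hupd : PySem.Set.update s (v :: vs) = PySem.Set.update (s ++ [v]) vs := by
        simp only [PySem.Set.update, List.foldl_cons]
        congr 1
        simp [PySem.Set.add, List.contains_eq_mem, h]
      rw [hupd, ht]
      simp

-- A's loop invariant: the accumulated product is the product of the set elements added beyond the start
theorem pv_loopA (vs : List Int) : ∀ (p : Int) (s : PySem.Set Int),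
    (vs.foldl (fun (st : Int × PySem.Set Int) v =>
        ((if st.2.contains v then st.1 else st.1 * v), st.2.add v)) (p, s)).1
      = p * ((PySem.Set.update s vs).drop s.length).foldl (fun a b => a * b) 1 := by
  induction vs with
  | nil => intro p s; simp [PySem.Set.update]
  | cons v vs ih =>
    intro p s
    by_cases h : v ∈ s
    · have hstate : (v :: vs).foldl (fun (st : Int × PySem.Set Int) v =>
          ((if st.2.contains v then st.1 else st.1 * v), st.2.add v)) (p, s)
        = vs.foldl (fun (st : Int × PySem.Set Int) v =>
          ((if st.2.contains v then st.1 else st.1 * v), st.2.add v)) (p, s) := by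
        rw [List.foldl_cons]
        congr 1
        simp [PySem.Set.add, List.contains_eq_mem, h]
      rw [hstate, ih p s]
      have hupd : PySem.Set.update s (v :: vs) = PySem.Set.update s vs := by
        simp only [PySem.Set.update, List.foldl_cons]
        congr 1
        simp [PySem.Set.add, List.contains_eq_mem, h]
      rw [hupd]
    · have hstate : (v :: vs).foldl (fun (st : Int × PySem.Set Int) v =>
          ((if st.2.contains v then st.1 else st.1 * v), st.2.add v)) (p, s)
        = vs.foldl (fun (st : Int × PySem.Set Int) v =>
          ((if st.2.contains v then st.1 else st.1 * v), st.2.add v)) (p * v, s ++ [v]) := by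
        rw [List.foldl_cons]
        congr 1
        simp [PySem.Set.add, List.contains_eq_mem, h]
      rw [hstate, ih (p * v) (s ++ [v])]
      have hupd : PySem.Set.update s (v :: vs) = PySem.Set.update (s ++ [v]) vs := by
        simp only [PySem.Set.update, List.foldl_cons]
        congr 1
        simp [PySem.Set.add, List.contains_eq_mem, h]
      rw [hupd]
      obtain ⟨t, ht⟩ := pv_update_prefix vs (s ++ [v])
      rw [ht]
      have h1 : ((s ++ [v]) ++ t).drop s.length = v :: t := by
        rw [List.append_assoc, List.drop_append_of_le_length (le_refl _)]
        simp
      have h2 : ((s ++ [v]) ++ t).drop (s ++ [v]).length = t := by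
        simp
      rw [h1, h2]
      simp only [List.foldl_cons]
      rw [pv_foldl_mul t (1 * v)]
      ring

-- prepending an element to the start set = filtering it out of the input, modulo that leading element
theorem pv_update_cons (x : Int) (vs : List Int) : ∀ (s : PySem.Set Int),
    PySem.Set.update (x :: s) vs = x :: PySem.Set.update s (vs.filter (fun v => !(v == x))) := by
  induction vs with
  | nil => intro s; simp [PySem.Set.update]
  | cons v vs ih =>
    intro s
    have hcons : PySem.Set.update (x :: s) (v :: vs) = PySem.Set.update (PySem.Set.add (x :: s) v) vs := by
      simp [PySem.Set.update]
    by_cases hv : v = x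
    · subst hv
      have hadd : PySem.Set.add (v :: s) v = v :: s := by
        simp [PySem.Set.add, PySem.Set.contains]
      rw [hcons, hadd, ih s]
      simp only [List.filter_cons]
      norm_num
    · have hb : (!((v : Int) == x)) = true := by simp [hv]
      have hadd : PySem.Set.add (x :: s) v = x :: PySem.Set.add s v := by
        by_cases h : v ∈ s
        · simp [PySem.Set.add, List.contains_eq_mem, h, hv]
        · simp [PySem.Set.add, List.contains_eq_mem, h, hv]
      rw [hcons, hadd, ih (PySem.Set.add s v)]
      simp only [List.filter_cons, hb, if_pos]
      rw [show PySem.Set.update s (v :: vs.filter (fun w => !(w == x)))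
            = PySem.Set.update (PySem.Set.add s v) (vs.filter (fun w => !(w == x))) from by
          simp [PySem.Set.update]]

-- adjacent-duplicate removal relative to a previous value (mirror of B's prev variable)
def pvDedup (p : Option Int) : List Int → List Int
  | [] => []
  | v :: t => if some v = p then pvDedup (some v) t else v :: pvDedup (some v) t

-- B's loop invariant: the accumulated product is the product of the adjacent-deduped list without 1s
theorem pv_loopB (xs : List Int) : ∀ (a : Int) (p : Option Int),
    (xs.foldl (fun (st : Int × Option Int) v =>
        ((if some v ≠ st.2 ∧ v ≠ 1 then st.1 * v else st.1), some v)) (a, p)).1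
      = a * ((pvDedup p xs).filter (fun v => !(v == 1))).foldl (fun x y => x * y) 1 := by
  induction xs with
  | nil => intro a p; simp [pvDedup]
  | cons v t ih =>
    intro a p
    simp only [List.foldl_cons, pvDedup]
    by_cases hp : some v = p
    · have : ¬ (some v ≠ p ∧ v ≠ 1) := by tauto
      rw [if_neg this, if_pos hp, ih a (some v)]
    · by_cases h1 : v = 1
      · have : ¬ (some v ≠ p ∧ v ≠ 1) := by tauto
        rw [if_neg this, if_neg hp, ih a (some v)]
        subst h1
        simp
      · have hb : (!((v : Int) == 1)) = true := by simp [h1]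
        rw [if_pos ⟨hp, h1⟩, if_neg hp, ih (a * v) (some v)]
        have hf : List.filter (fun w => !(w == 1)) (v :: pvDedup (some v) t)
            = v :: List.filter (fun w => !(w == 1)) (pvDedup (some v) t) := by
          simp [hb]
        rw [hf, List.foldl_cons, pv_foldl_mul _ (1 * v)]
        ring

-- on a sorted tail bounded below by q, pvDedup (some q) is nodup and keeps exactly the elements ≠ q
theorem pv_dedup_some (xs : List Int) : ∀ (q : Int), xs.Pairwise (· ≤ ·) → (∀ x ∈ xs, q ≤ x) →
    (pvDedup (some q) xs).Nodup ∧ (∀ x, x ∈ pvDedup (some q) xs ↔ x ∈ xs ∧ x ≠ q) := by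
  induction xs with
  | nil => intro q _ _; simp [pvDedup]
  | cons v t ih =>
    intro q hpw hlb
    have hvt : ∀ x ∈ t, v ≤ x := fun x hx => (List.pairwise_cons.mp hpw).1 x hx
    have hpt : t.Pairwise (· ≤ ·) := (List.pairwise_cons.mp hpw).2
    have hqv : q ≤ v := hlb v (List.mem_cons_self)
    by_cases hv : v = q
    · subst hv
      obtain ⟨hnd, hmem⟩ := ih v hpt hvt
      have hred : pvDedup (some v) (v :: t) = pvDedup (some v) t := by simp [pvDedup]
      refine ⟨hred ▸ hnd, fun x => ?_⟩
      rw [hred, hmem x]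
      constructor
      · rintro ⟨hx, hne⟩; exact ⟨List.mem_cons_of_mem _ hx, hne⟩
      · rintro ⟨hx, hne⟩
        rcases List.mem_cons.mp hx with h | h
        · exact absurd h hne
        · exact ⟨h, hne⟩
    · obtain ⟨hnd, hmem⟩ := ih v hpt hvt
      have hqlt : q < v := lt_of_le_of_ne hqv (Ne.symm hv)
      have hred : pvDedup (some q) (v :: t) = v :: pvDedup (some v) t := by
        simp [pvDedup, hv]
      rw [hred]
      refine ⟨List.nodup_cons.mpr ⟨fun hc => ((hmem v).mp hc).2 rfl, hnd⟩, fun x => ?_⟩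
      rw [List.mem_cons, hmem x, List.mem_cons]
      constructor
      · rintro (rfl | ⟨hx, _⟩)
        · exact ⟨Or.inl rfl, hv⟩
        · exact ⟨Or.inr hx, ne_of_gt (lt_of_lt_of_le hqlt (hvt x hx))⟩
      · rintro ⟨rfl | hx, hne⟩
        · exact Or.inl rfl
        · by_cases hxv : x = v
          · exact Or.inl hxv
          · exact Or.inr ⟨hx, hxv⟩

-- on a sorted list, pvDedup none is nodup and membership-preserving
theorem pv_dedup_none (xs : List Int) (h : xs.Pairwise (· ≤ ·)) :
    (pvDedup none xs).Nodup ∧ (∀ x, x ∈ pvDedup none xs ↔ x ∈ xs) := by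
  cases xs with
  | nil => simp [pvDedup]
  | cons v t =>
    have hvt : ∀ x ∈ t, v ≤ x := fun x hx => (List.pairwise_cons.mp h).1 x hx
    have hpt : t.Pairwise (· ≤ ·) := (List.pairwise_cons.mp h).2
    obtain ⟨hnd, hmem⟩ := pv_dedup_some t v hpt hvt
    have hred : pvDedup none (v :: t) = v :: pvDedup (some v) t := by simp [pvDedup]
    rw [hred]
    refine ⟨List.nodup_cons.mpr ⟨fun hc => ((hmem v).mp hc).2 rfl, hnd⟩, fun x => ?_⟩
    rw [List.mem_cons, hmem x, List.mem_cons]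
    constructor
    · rintro (rfl | ⟨hx, _⟩)
      · exact Or.inl rfl
      · exact Or.inr hx
    · rintro (rfl | hx)
      · exact Or.inl rfl
      · by_cases hxv : x = v
        · exact Or.inl hxv
        · exact Or.inr ⟨hx, hxv⟩

-- ===== VERDICT (by name: the statement is the Claim_ definition above) =====
theorem calc_modulo_spec : Claim_equal_calc_modulo := by
  intro monkeys _ _
  unfold Spec_calc_modulo calc_modulo calc_modulo_alt
  rw [PySem.List.foldl_pyRange_zero_pyGetD'
    (f := fun (st : Int × PySem.Set Int) m =>
      ((if st.2.contains (PySem.Dict.getD (PySem.Dict.mk m) "mod" 0) then st.1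
        else st.1 * PySem.Dict.getD (PySem.Dict.mk m) "mod" 0),
       st.2.add (PySem.Dict.getD (PySem.Dict.mk m) "mod" 0)))]
  rw [← List.foldl_map
    (f := fun (m : List (String × Int)) => PySem.Dict.getD (PySem.Dict.mk m) "mod" 0)
    (g := fun (st : Int × PySem.Set Int) (v : Int) =>
      ((if st.2.contains v then st.1 else st.1 * v), st.2.add v))]
  set vs := monkeys.map (fun m => PySem.Dict.getD (PySem.Dict.mk m) "mod" 0) with hvs
  rw [pv_loopA vs 1 (PySem.Set.ofList [1])]
  have h0 : PySem.Set.ofList [(1 : Int)] = ((1 : Int) :: ([] : PySem.Set Int)) := by decide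
  rw [h0, pv_update_cons 1 vs ([] : PySem.Set Int)]
  rw [pv_loopB (PySem.List.sorted vs (fun x => x) false) 1 none]
  simp only [List.length_cons, List.length_nil, List.drop_succ_cons, List.drop_zero, one_mul]
  -- both sides are products of nodup lists with the same members: permute
  have hAnd : (PySem.Set.update ([] : PySem.Set Int) (vs.filter (fun v => !(v == 1)))).Nodup :=
    PySem.Set.nodup_update _ _ List.nodup_nil
  have hsp : (PySem.List.sorted vs (fun x => x) false).Pairwise (· ≤ ·) := by
    have := PySem.List.sorted_pairwise (xs := vs) (key := fun x => x)
    simpa using this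
  obtain ⟨hBnd0, hBmem0⟩ := pv_dedup_none (PySem.List.sorted vs (fun x => x) false) hsp
  have hBnd : ((pvDedup none (PySem.List.sorted vs (fun x => x) false)).filter (fun v => !(v == 1))).Nodup :=
    hBnd0.filter _
  have hperm : (PySem.Set.update ([] : PySem.Set Int) (vs.filter (fun v => !(v == 1)))).Perm
      ((pvDedup none (PySem.List.sorted vs (fun x => x) false)).filter (fun v => !(v == 1))) := by
    rw [List.perm_ext_iff_of_nodup hAnd hBnd]
    intro x
    rw [PySem.Set.mem_update, List.mem_filter, List.mem_filter, hBmem0 x, PySem.List.mem_sorted]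
    simp
  calc (PySem.Set.update ([] : PySem.Set Int) (vs.filter (fun v => !(v == 1)))).foldl (fun a b => a * b) 1
      = (PySem.Set.update ([] : PySem.Set Int) (vs.filter (fun v => !(v == 1)))).prod := by
        rw [List.prod_eq_foldl]
    _ = ((pvDedup none (PySem.List.sorted vs (fun x => x) false)).filter (fun v => !(v == 1))).prod :=
        hperm.prod_eq
    _ = ((pvDedup none (PySem.List.sorted vs (fun x => x) false)).filter (fun v => !(v == 1))).foldl (fun x y => x * y) 1 := by
        rw [List.prod_eq_foldl]
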